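-- pv_equiv track=rewrite | github.com/AlexM1010/FollowWeb | analysis_tools/cleanup/orchestrator.py | _generate_scripts_readme
-- ===== SOURCE A (Python) =====
-- def _generate_scripts_readme(file_mappings: list, scripts_structure: dict) -> str:
--     """
--     Generate README.md content for scripts directory.
--
--     Args:
--         file_mappings: List of file mappings with categories
--         scripts_structure: Dictionary of script categories and paths
--
--     Returns:
--         README.md content as string
--     """
--     # Group scripts by category
--     scripts_by_category = {}
--     for mapping in file_mappings:
--         category = mapping['category']
--         if category not in scripts_by_category:
--             scripts_by_category[category] = []
--         scripts_by_category[category].append(mapping['source'])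
--
--     # Generate README content
--     content = "# Utility Scripts\n\n"
--     content += "This directory contains utility scripts organized by purpose.\n\n"
--
--     # Category descriptions
--     category_descriptions = {
--         'freesound': 'Scripts for Freesound API operations and data collection',
--         'backup': 'Scripts for checkpoint backup and restoration',
--         'validation': 'Scripts for data validation and verification',
--         'generation': 'Scripts for generating visualizations and reports',
--         'testing': 'Scripts for testing and benchmarking',
--         'analysis': 'Scripts for data analysis and processing',
--     }
--
--     content += "## Directory Structure\n\n"
--
--     for category, path in sorted(scripts_structure.items()):
--         description = category_descriptions.get(category, 'Utility scripts')
--         content += f"### `{path}/`\n\n"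
--         content += f"{description}\n\n"
--
--         if category in scripts_by_category:
--             content += "Scripts:\n"
--             for script in sorted(scripts_by_category[category]):
--                 content += f"- `{script}`\n"
--             content += "\n"
--
--     content += "## Usage\n\n"
--     content += "All scripts can be run from the repository root:\n\n"
--     content += "```bash\n"
--     content += "python scripts/<category>/<script_name>.py\n"
--     content += "```\n\n"
--
--     return content
-- ===== SOURCE B (Python) =====
-- def _generate_scripts_readme(file_mappings: list, scripts_structure: dict) -> str:
--     """Build the scripts README by one global sort of (category, source) pairs
--     plus per-category filtering, assembling the text as a joined list of parts."""
--     category_descriptions = {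
--         'freesound': 'Scripts for Freesound API operations and data collection',
--         'backup': 'Scripts for checkpoint backup and restoration',
--         'validation': 'Scripts for data validation and verification',
--         'generation': 'Scripts for generating visualizations and reports',
--         'testing': 'Scripts for testing and benchmarking',
--         'analysis': 'Scripts for data analysis and processing',
--     }
--     pairs = sorted((m['category'], m['source']) for m in file_mappings)
--     parts = [
--         "# Utility Scripts\n\n",
--         "This directory contains utility scripts organized by purpose.\n\n",
--         "## Directory Structure\n\n",
--     ]
--     for category, path in sorted(scripts_structure.items()):
--         description = category_descriptions.get(category, 'Utility scripts')
--         parts.append(f"### `{path}/`\n\n{description}\n\n")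
--         scripts = [s for c, s in pairs if c == category]
--         if scripts:
--             parts.append("Scripts:\n")
--             parts.extend(f"- `{s}`\n" for s in scripts)
--             parts.append("\n")
--     parts.append(
--         "## Usage\n\n"
--         "All scripts can be run from the repository root:\n\n"
--         "```bash\n"
--         "python scripts/<category>/<script_name>.py\n"
--         "```\n\n"
--     )
--     return "".join(parts)
-- ===== Notes on version B (the rewrite author's own statement) =====
-- stated objective: alternative
-- what changed: B drops A's scripts_by_category grouping dict and its per-category sorts: it sorts the (category, source) pairs once globally, slices each category's already-sorted scripts out of that list by filtering, and assembles the README as a joined list of parts instead of repeated string concatenation.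
import Mathlib
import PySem

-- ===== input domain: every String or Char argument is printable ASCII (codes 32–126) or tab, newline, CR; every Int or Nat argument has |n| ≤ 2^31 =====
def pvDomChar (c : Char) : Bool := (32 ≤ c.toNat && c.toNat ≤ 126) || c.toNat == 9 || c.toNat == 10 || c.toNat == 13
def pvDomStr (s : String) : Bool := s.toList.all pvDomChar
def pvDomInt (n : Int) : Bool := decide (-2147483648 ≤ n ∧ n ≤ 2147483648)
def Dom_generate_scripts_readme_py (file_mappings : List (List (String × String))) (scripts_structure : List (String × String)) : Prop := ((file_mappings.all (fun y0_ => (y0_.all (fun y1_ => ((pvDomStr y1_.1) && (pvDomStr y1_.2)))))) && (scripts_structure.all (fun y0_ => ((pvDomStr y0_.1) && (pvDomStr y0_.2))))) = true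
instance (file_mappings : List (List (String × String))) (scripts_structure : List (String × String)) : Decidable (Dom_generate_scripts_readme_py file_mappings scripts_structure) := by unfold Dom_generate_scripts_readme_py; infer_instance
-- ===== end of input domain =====

-- B replaces A's grouping dict (plus one sort per category) by one global sort of the
-- (category, source) pairs followed by per-category filtering, and joins a list of parts
-- instead of growing one string (objective: alternative decomposition, same output).

-- ===== PORT A =====
-- the category-description table (a literal dict in both Pythons)
def pvCategoryDescriptions : PySem.Dict String String := PySem.Dict.ofList [
  ("freesound", "Scripts for Freesound API operations and data collection"),
  ("backup", "Scripts for checkpoint backup and restoration"),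
  ("validation", "Scripts for data validation and verification"),
  ("generation", "Scripts for generating visualizations and reports"),
  ("testing", "Scripts for testing and benchmarking"),
  ("analysis", "Scripts for data analysis and processing")]

def generate_scripts_readme_py (file_mappings : List (List (String × String))) (scripts_structure : List (String × String)) : String :=
  -- Group scripts by category (mapping['category'] / mapping['source']: KeyError excluded by Pre_)
  let scripts_by_category : PySem.Dict String (List String) :=
    file_mappings.foldl (fun d mapping =>
      let m := PySem.Dict.ofList mapping
      let category := m.getD "category" ""
      let d := if d.contains category then d else d.insert category []
      d.insert category (d.getD category [] ++ [m.getD "source" ""])) PySem.Dict.empty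
  let content := "# Utility Scripts\n\n"
  let content := content ++ "This directory contains utility scripts organized by purpose.\n\n"
  let content := content ++ "## Directory Structure\n\n"
  let content := (PySem.List.sorted2 (PySem.Dict.ofList scripts_structure).items Prod.fst Prod.snd).foldl
    (fun content kv =>
      let description := pvCategoryDescriptions.getD kv.1 "Utility scripts"
      let content := content ++ "### `" ++ kv.2 ++ "/`\n\n"
      let content := content ++ description ++ "\n\n"
      if scripts_by_category.contains kv.1 then
        let content := content ++ "Scripts:\n"
        let content := (PySem.List.sorted (scripts_by_category.getD kv.1 []) (fun x => x)).foldl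
          (fun content script => content ++ "- `" ++ script ++ "`\n") content
        content ++ "\n"
      else content) content
  let content := content ++ "## Usage\n\n"
  let content := content ++ "All scripts can be run from the repository root:\n\n"
  let content := content ++ "```bash\n"
  let content := content ++ "python scripts/<category>/<script_name>.py\n"
  let content := content ++ "```\n\n"
  content

-- ===== PORT B =====
def generate_scripts_readme_py_alt (file_mappings : List (List (String × String))) (scripts_structure : List (String × String)) : String :=
  let pairs := PySem.List.sorted2 (file_mappings.map (fun mapping =>
      let m := PySem.Dict.ofList mapping
      (m.getD "category" "", m.getD "source" ""))) Prod.fst Prod.snd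
  let parts := ["# Utility Scripts\n\n",
                "This directory contains utility scripts organized by purpose.\n\n",
                "## Directory Structure\n\n"]
  let parts := (PySem.List.sorted2 (PySem.Dict.ofList scripts_structure).items Prod.fst Prod.snd).foldl
    (fun parts kv =>
      let description := pvCategoryDescriptions.getD kv.1 "Utility scripts"
      let parts := parts ++ ["### `" ++ kv.2 ++ "/`\n\n" ++ description ++ "\n\n"]
      let scripts := (pairs.filter (fun p => p.1 == kv.1)).map Prod.snd
      if scripts.isEmpty then parts
      else ((parts ++ ["Scripts:\n"]) ++ scripts.map (fun s => "- `" ++ s ++ "`\n")) ++ ["\n"]) parts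
  let parts := parts ++ ["## Usage\n\nAll scripts can be run from the repository root:\n\n```bash\npython scripts/<category>/<script_name>.py\n```\n\n"]
  String.join parts

-- ===== PRECONDITION & SPEC =====
-- Pre_ excludes only mappings missing a 'category' or 'source' key, on which Python A raises KeyError.
def Pre_generate_scripts_readme_py (file_mappings : List (List (String × String))) (scripts_structure : List (String × String)) : Prop :=
  (file_mappings.all (fun m => m.any (fun p => p.1 == "category") && m.any (fun p => p.1 == "source"))) = true
instance (file_mappings : List (List (String × String))) (scripts_structure : List (String × String)) : Decidable (Pre_generate_scripts_readme_py file_mappings scripts_structure) := by unfold Pre_generate_scripts_readme_py; infer_instance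

def pvWitness_generate_scripts_readme_py : (List (List (String × String))) × (List (String × String)) :=
  ([[("category", "backup"), ("source", "b.py")], [("category", "misc"), ("source", "a.py")]],
   [("backup", "scripts/backup"), ("misc", "scripts/misc")])

def Spec_generate_scripts_readme_py (file_mappings : List (List (String × String))) (scripts_structure : List (String × String)) (out : String) : Prop := out = generate_scripts_readme_py_alt file_mappings scripts_structure
instance (file_mappings : List (List (String × String))) (scripts_structure : List (String × String)) (out : String) : Decidable (Spec_generate_scripts_readme_py file_mappings scripts_structure out) := by unfold Spec_generate_scripts_readme_py; infer_instance

-- ===== CLAIM (what is proved, stated in full; the proofs are below) =====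
def Claim_equal_generate_scripts_readme_py : Prop := ∀ (file_mappings : List (List (String × String))) (scripts_structure : List (String × String)), Dom_generate_scripts_readme_py file_mappings scripts_structure → Pre_generate_scripts_readme_py file_mappings scripts_structure → Spec_generate_scripts_readme_py file_mappings scripts_structure (generate_scripts_readme_py file_mappings scripts_structure)

-- ===== LEMMAS AND PROOFS =====

-- the (category, source) projection of one mapping
def pvPair (mapping : List (String × String)) : String × String :=
  ((PySem.Dict.ofList mapping).getD "category" "", (PySem.Dict.ofList mapping).getD "source" "")

-- A's grouping step, named for the lemmas (defeq to the lambda in the A port)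
def pvGroupStep (d : PySem.Dict String (List String)) (mapping : List (String × String)) : PySem.Dict String (List String) :=
  let m := PySem.Dict.ofList mapping
  let category := m.getD "category" ""
  let d := if d.contains category then d else d.insert category []
  d.insert category (d.getD category [] ++ [m.getD "source" ""])

def pvSbc (file_mappings : List (List (String × String))) : PySem.Dict String (List String) :=
  file_mappings.foldl pvGroupStep PySem.Dict.empty

def pvPairs (file_mappings : List (List (String × String))) : List (String × String) :=
  PySem.List.sorted2 (file_mappings.map pvPair) Prod.fst Prod.snd

-- A's per-category loop body, named (defeq to the lambda in the A port)
def pvStepA (file_mappings : List (List (String × String))) (content : String) (kv : String × String) : String :=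
  let description := pvCategoryDescriptions.getD kv.1 "Utility scripts"
  let content := content ++ "### `" ++ kv.2 ++ "/`\n\n"
  let content := content ++ description ++ "\n\n"
  if (pvSbc file_mappings).contains kv.1 then
    let content := content ++ "Scripts:\n"
    let content := (PySem.List.sorted ((pvSbc file_mappings).getD kv.1 []) (fun x => x)).foldl
      (fun content script => content ++ "- `" ++ script ++ "`\n") content
    content ++ "\n"
  else content

-- B's per-category loop body, named (defeq to the lambda in the B port)
def pvStepB (file_mappings : List (List (String × String))) (parts : List String) (kv : String × String) : List String :=
  let description := pvCategoryDescriptions.getD kv.1 "Utility scripts"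
  let parts := parts ++ ["### `" ++ kv.2 ++ "/`\n\n" ++ description ++ "\n\n"]
  let scripts := ((pvPairs file_mappings).filter (fun p => p.1 == kv.1)).map Prod.snd
  if scripts.isEmpty then parts
  else ((parts ++ ["Scripts:\n"]) ++ scripts.map (fun s => "- `" ++ s ++ "`\n")) ++ ["\n"]

lemma pvFoldl_shift (l : List String) (s : String) :
    l.foldl (fun r x => r ++ x) s = s ++ l.foldl (fun r x => r ++ x) "" := by
  induction l generalizing s with
  | nil => simp
  | cons a t ih =>
      rw [List.foldl_cons, List.foldl_cons, ih (s ++ a), ih ("" ++ a)]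
      simp [String.append_assoc]

lemma pvJoin_cons (a : String) (t : List String) : String.join (a :: t) = a ++ String.join t := by
  show List.foldl (fun r x => r ++ x) "" (a :: t) = _
  rw [List.foldl_cons, pvFoldl_shift]; simp [String.join]

lemma pvJoin_append (l1 l2 : List String) : String.join (l1 ++ l2) = String.join l1 ++ String.join l2 := by
  induction l1 with
  | nil => simp [String.join]
  | cons a t ih => simp [pvJoin_cons, ih, String.append_assoc]

lemma pvFoldl_append_join {α : Type} (f : α → String) (l : List α) (s : String) :
    l.foldl (fun c x => c ++ f x) s = s ++ String.join (l.map f) := by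
  induction l generalizing s with
  | nil => simp [String.join]
  | cons a t ih => simp [List.foldl, ih, pvJoin_cons, String.append_assoc]

lemma pvAny_eq_not_isEmpty {α : Type} (l : List α) (p : α → Bool) : l.any p = !(l.filter p).isEmpty := by
  induction l with
  | nil => rfl
  | cons a t ih =>
      by_cases h : p a
      · simp [h]
      · simp [h, ih]

lemma pvIsEmpty_congr_perm {α : Type} (u v : List α) (h : u.Perm v) : u.isEmpty = v.isEmpty := by
  cases u <;> cases v <;> first | rfl | (exfalso; simpa using h.length_eq)

lemma pvStep_getD (d : PySem.Dict String (List String)) (m : List (String × String)) (c : String) :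
    (pvGroupStep d m).getD c [] = if c = (pvPair m).1 then d.getD c [] ++ [(pvPair m).2] else d.getD c [] := by
  unfold pvGroupStep pvPair
  simp only []
  generalize (PySem.Dict.ofList m).getD "category" "" = k
  generalize (PySem.Dict.ofList m).getD "source" "" = s
  by_cases hc : d.contains k
  · simp only [hc, if_true, PySem.Dict.getD_insert]
    split_ifs with he
    · subst he; rfl
    · rfl
  · simp only [hc, Bool.false_eq_true, if_false, PySem.Dict.getD_insert_self,
      PySem.Dict.getD_insert, List.nil_append]
    split_ifs with he
    · subst he; rw [PySem.Dict.getD_of_not_contains d ([] : List String) (by simpa using hc)]; rfl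
    · rfl

lemma pvStep_contains (d : PySem.Dict String (List String)) (m : List (String × String)) (c : String) :
    (pvGroupStep d m).contains c = ((c == (pvPair m).1) || d.contains c) := by
  unfold pvGroupStep pvPair
  simp only []
  generalize (PySem.Dict.ofList m).getD "category" "" = k
  by_cases hc : d.contains k
  · simp only [hc, if_true, PySem.Dict.contains_insert]
  · simp only [hc, Bool.false_eq_true, if_false, PySem.Dict.contains_insert]
    simp

lemma pvGroup_spec (fm : List (List (String × String))) (d : PySem.Dict String (List String)) (c : String) :
    ((fm.foldl pvGroupStep d).getD c [] = d.getD c [] ++ ((fm.map pvPair).filter (fun p => p.1 == c)).map Prod.snd)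
    ∧ ((fm.foldl pvGroupStep d).contains c = (d.contains c || (fm.map pvPair).any (fun p => p.1 == c))) := by
  induction fm generalizing d with
  | nil => simp
  | cons m t ih =>
      simp only [List.foldl_cons, List.map_cons, List.filter_cons, List.any_cons]
      obtain ⟨ih1, ih2⟩ := ih (pvGroupStep d m)
      constructor
      · rw [ih1, pvStep_getD]
        by_cases he : (pvPair m).1 = c
        · simp [he]
        · simp [he, Ne.symm he, beq_iff_eq]
      · rw [ih2, pvStep_contains]
        by_cases he : (pvPair m).1 = c
        · simp [he]
        · have h1 : ((pvPair m).1 == c) = false := by simp [he]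
          have h2 : (c == (pvPair m).1) = false := by simp [Ne.symm he]
          simp [h1, h2]

lemma pvSorted2_eq_sorted_lex (ps : List (String × String)) :
    PySem.List.sorted2 ps Prod.fst Prod.snd = PySem.List.sorted ps (fun p => toLex p) := by
  unfold PySem.List.sorted2 PySem.List.sorted
  simp only [if_neg (by decide : ¬(false = true))]
  congr 1
  funext acc x
  congr 1
  funext a b
  by_cases h1 : a.1 < b.1
  · simp [h1, Prod.Lex.lt_iff, asymm h1]
  · by_cases h2 : b.1 < a.1
    · simp [h1, h2, Prod.Lex.lt_iff, ne_of_gt h2]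
    · have he : a.1 = b.1 := le_antisymm (not_lt.1 h2) (not_lt.1 h1)
      simp [Prod.Lex.lt_iff, he]

lemma pvSort_filter (ps : List (String × String)) (c : String) :
    ((PySem.List.sorted2 ps Prod.fst Prod.snd).filter (fun p => p.1 == c)).map Prod.snd
      = PySem.List.sorted ((ps.filter (fun p => p.1 == c)).map Prod.snd) (fun x => x) := by
  apply PySem.List.eq_of_perm_of_pairwise_le_of_injective (fun x => x) Function.injective_id
  · exact ((PySem.List.sorted2_perm ps Prod.fst Prod.snd false).filter _ |>.map _).trans
      ((PySem.List.sorted_perm _ _ false).symm)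
  · rw [pvSorted2_eq_sorted_lex]
    have hf := (PySem.List.sorted_pairwise ps (fun p => toLex p)).filter (fun p => p.1 == c)
    rw [List.pairwise_map]
    apply List.Pairwise.imp_of_mem ?_ hf
    intro a b ha hb hab
    have ha1 : a.1 = c := by simpa using (List.mem_filter.1 ha).2
    have hb1 : b.1 = c := by simpa using (List.mem_filter.1 hb).2
    rcases Prod.Lex.le_iff.1 hab with h | h
    · simp only [ofLex_toLex] at h; rw [ha1, hb1] at h; exact absurd h (lt_irrefl c)
    · simpa using h.2
  · exact PySem.List.sorted_pairwise _ _

-- A's sorted per-category script list = B's filtered slice of the globally sorted pairs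
lemma pvScripts_eq (fm : List (List (String × String))) (c : String) :
    PySem.List.sorted ((pvSbc fm).getD c []) (fun x => x)
      = ((pvPairs fm).filter (fun p => p.1 == c)).map Prod.snd := by
  unfold pvSbc pvPairs
  rw [(pvGroup_spec fm PySem.Dict.empty c).1, pvSort_filter]
  simp [PySem.Dict.getD_empty]

-- A's 'category in scripts_by_category' = B's 'scripts is non-empty'
lemma pvContains_eq (fm : List (List (String × String))) (c : String) :
    (pvSbc fm).contains c = !(((pvPairs fm).filter (fun p => p.1 == c)).map Prod.snd).isEmpty := by
  unfold pvSbc pvPairs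
  rw [(pvGroup_spec fm PySem.Dict.empty c).2]
  have hperm := (PySem.List.sorted2_perm (fm.map pvPair) Prod.fst Prod.snd false).filter (fun p => p.1 == c)
  simp only [PySem.Dict.contains_empty, Bool.false_or, List.isEmpty_map]
  rw [pvAny_eq_not_isEmpty, pvIsEmpty_congr_perm _ _ hperm]

lemma pvStep_join (fm : List (List (String × String))) (parts : List String) (kv : String × String) :
    pvStepA fm (String.join parts) kv = String.join (pvStepB fm parts kv) := by
  unfold pvStepA pvStepB
  simp only []
  rw [pvContains_eq fm kv.1]
  cases hb : (((pvPairs fm).filter (fun p => p.1 == kv.1)).map Prod.snd).isEmpty with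
  | true =>
      simp only [Bool.not_true, Bool.false_eq_true, if_false, if_true]
      rw [pvJoin_append, pvJoin_cons]
      simp [String.append_assoc, String.join]
  | false =>
      simp only [Bool.not_false, if_true, Bool.false_eq_true, if_false]
      rw [pvScripts_eq fm kv.1]
      have hfold := pvFoldl_append_join (fun script => "- `" ++ (script ++ "`\n"))
        (((pvPairs fm).filter (fun p => p.1 == kv.1)).map Prod.snd)
      simp only [String.append_assoc] at hfold ⊢
      rw [hfold]
      simp only [pvJoin_append, pvJoin_cons, String.append_assoc, String.append_empty,
        show String.join ([] : List String) = "" from rfl]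

lemma pvFold_join (fm : List (List (String × String))) (items : List (String × String)) (parts : List String) :
    items.foldl (pvStepA fm) (String.join parts) = String.join (items.foldl (pvStepB fm) parts) := by
  induction items generalizing parts with
  | nil => rfl
  | cons kv t ih =>
      rw [List.foldl_cons, List.foldl_cons, pvStep_join fm parts kv]
      exact ih (pvStepB fm parts kv)

-- ===== VERDICT (by name: the statement is the Claim_ definition above) =====
theorem generate_scripts_readme_py_spec : Claim_equal_generate_scripts_readme_py := by
  intro fm ss _ _
  unfold Spec_generate_scripts_readme_py
  have hA : generate_scripts_readme_py fm ss
      = ((PySem.List.sorted2 (PySem.Dict.ofList ss).items Prod.fst Prod.snd).foldl (pvStepA fm)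
          (String.join ["# Utility Scripts\n\n",
                        "This directory contains utility scripts organized by purpose.\n\n",
                        "## Directory Structure\n\n"]))
        ++ "## Usage\n\n" ++ "All scripts can be run from the repository root:\n\n" ++ "```bash\n"
        ++ "python scripts/<category>/<script_name>.py\n" ++ "```\n\n" := rfl
  have hB : generate_scripts_readme_py_alt fm ss
      = String.join (((PySem.List.sorted2 (PySem.Dict.ofList ss).items Prod.fst Prod.snd).foldl (pvStepB fm)
          ["# Utility Scripts\n\n",
           "This directory contains utility scripts organized by purpose.\n\n",
           "## Directory Structure\n\n"])
        ++ ["## Usage\n\nAll scripts can be run from the repository root:\n\n```bash\npython scripts/<category>/<script_name>.py\n```\n\n"]) := rfl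
  rw [hA, hB, pvFold_join, pvJoin_append]
  simp only [String.append_assoc]
  congr 1
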